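-- pv_equiv track=rewrite | github.com/VoHaiDung/ag-news-text-classification | src/utils/api_utils.py | sanitize_input
-- ===== SOURCE A (Python) =====
-- from typing import Any, Dict, List, Optional, Callable, Union, Tuple
--
-- def sanitize_input(text: str,
--                   max_length: int = 10000,
--                   allowed_chars: Optional[str] = None) -> str:
--     """
--     Sanitize text input
--
--     Args:
--         text: Input text
--         max_length: Maximum allowed length
--         allowed_chars: Allowed character set
--
--     Returns:
--         Sanitized text
--     """
--     # Truncate to max length
--     text = text[:max_length]
--
--     # Remove control characters
--     text = ''.join(char for char in text if ord(char) >= 32 or char == '\n')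
--
--     # Apply character whitelist if provided
--     if allowed_chars:
--         text = ''.join(char for char in text if char in allowed_chars)
--
--     return text.strip()
-- ===== SOURCE B (Python) =====
-- from typing import Optional
--
-- def sanitize_input(text: str,
--                    max_length: int = 10000,
--                    allowed_chars: Optional[str] = None) -> str:
--     # Single pass with inline stripping: kept whitespace is buffered in `pending`
--     # and only committed when a later non-whitespace character proves it interior,
--     # so no intermediate filtered string is built and .strip() is never called.
--     result = []
--     pending = []  # kept whitespace not yet known to be interior
--     for ch in text[:max_length]:
--         if ord(ch) < 32 and ch != '\n':
--             continue  # control character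
--         if allowed_chars and ch not in allowed_chars:
--             continue  # not whitelisted
--         if ch.isspace():
--             if result:
--                 pending.append(ch)
--             # else: leading whitespace, dropped
--         else:
--             result.extend(pending)
--             pending = []
--             result.append(ch)
--     # trailing whitespace left in pending is dropped
--     return ''.join(result)
-- ===== Notes on version B (the rewrite author's own statement) =====
-- stated objective: alternative
-- what changed: B never builds the filtered string nor calls .strip(): it does one pass keeping a result list plus a pending-whitespace buffer, dropping leading whitespace as it goes and committing buffered whitespace only when a later non-whitespace character proves it interior, so trailing whitespace dies in the buffer.
import Mathlib
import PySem

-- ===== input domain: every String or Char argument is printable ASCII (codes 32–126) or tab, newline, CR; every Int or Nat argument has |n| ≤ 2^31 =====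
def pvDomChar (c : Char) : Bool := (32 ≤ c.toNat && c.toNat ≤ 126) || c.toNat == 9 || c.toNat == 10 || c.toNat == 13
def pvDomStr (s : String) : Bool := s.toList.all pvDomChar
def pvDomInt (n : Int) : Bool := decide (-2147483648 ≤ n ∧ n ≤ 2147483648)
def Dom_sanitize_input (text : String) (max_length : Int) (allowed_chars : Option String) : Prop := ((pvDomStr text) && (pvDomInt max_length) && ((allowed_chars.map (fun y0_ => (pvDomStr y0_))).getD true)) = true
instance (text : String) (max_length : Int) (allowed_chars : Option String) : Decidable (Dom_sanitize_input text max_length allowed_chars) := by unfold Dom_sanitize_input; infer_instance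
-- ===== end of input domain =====

-- B is a single pass with a pending-whitespace buffer: it never materialises the
-- filtered string and never calls strip — leading whitespace is dropped on sight,
-- interior whitespace is committed when a later non-whitespace char arrives, and
-- trailing whitespace dies in the buffer (objective: alternative).

-- ===== PORT A =====
-- 'char in allowed_chars' (1-char needle) is exactly list membership of the char; exact.
def sanitize_input (text : String) (max_length : Int) (allowed_chars : Option String) : String :=
  -- text = text[:max_length]
  let t1 : List Char := (PySem.Str.slice text none (some max_length)).toList
  -- text = ''.join(char for char in text if ord(char) >= 32 or char == '\n')
  let t2 : List Char := t1.filter (fun c => decide (32 ≤ c.toNat) || c == '\n')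
  -- if allowed_chars: text = ''.join(char for char in text if char in allowed_chars)
  let t3 : List Char :=
    match allowed_chars with
    | none => t2
    | some a => if a.toList.isEmpty then t2
                else t2.filter (fun c => a.toList.contains c)
  -- return text.strip()
  PySem.Str.strip (String.ofList t3)

-- ===== PORT B =====
-- the body of B's for-loop: state = (result, pending)
def pvStepB (allowed_chars : Option String) (st : List Char × List Char) (ch : Char) : List Char × List Char :=
  -- if ord(ch) < 32 and ch != '\n': continue
  if ch.toNat < 32 && !(ch == '\n') then st
  -- if allowed_chars and ch not in allowed_chars: continue
  else if (match allowed_chars with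
           | none => false
           | some a => !(a.toList.isEmpty) && !(a.toList.contains ch)) then st
  -- if ch.isspace(): pending.append(ch) only when result nonempty
  else if PySem.Chars.isspace ch then
    (if st.1.isEmpty then st else (st.1, st.2 ++ [ch]))
  -- else: result.extend(pending); pending = []; result.append(ch)
  else (st.1 ++ st.2 ++ [ch], [])

def sanitize_input_alt (text : String) (max_length : Int) (allowed_chars : Option String) : String :=
  let fin := (PySem.Str.slice text none (some max_length)).toList.foldl (pvStepB allowed_chars) ([], [])
  -- return ''.join(result)
  String.ofList fin.1

-- ===== PRECONDITION & SPEC =====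
def Spec_sanitize_input (text : String) (max_length : Int) (allowed_chars : Option String) (out : String) : Prop := out = sanitize_input_alt text max_length allowed_chars
instance (text : String) (max_length : Int) (allowed_chars : Option String) (out : String) : Decidable (Spec_sanitize_input text max_length allowed_chars out) := by unfold Spec_sanitize_input; infer_instance

-- ===== CLAIM (what is proved, stated in full; the proofs are below) =====
def Claim_equal_sanitize_input : Prop := ∀ (text : String) (max_length : Int) (allowed_chars : Option String), Dom_sanitize_input text max_length allowed_chars → Spec_sanitize_input text max_length allowed_chars (sanitize_input text max_length allowed_chars)

-- ===== LEMMAS AND PROOFS =====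

-- A's fused keep-test: survives the control filter and the whitelist
def pvKeep (allowed_chars : Option String) (c : Char) : Bool :=
  (decide (32 ≤ c.toNat) || c == '\n') &&
  (match allowed_chars with
   | none => true
   | some a => a.toList.isEmpty || a.toList.contains c)

theorem rstrip_allspace (l : List Char) (h : l.all PySem.Chars.isspace) :
    PySem.Chars.rstrip l = [] := by
  unfold PySem.Chars.rstrip
  have : l.reverse.dropWhile PySem.Chars.isspace = [] := by
    rw [List.dropWhile_eq_nil_iff]
    intro x hx
    exact (List.all_eq_true.mp h) x (List.mem_reverse.mp hx)
  simp [this]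

theorem rstrip_append_cons (ys : List Char) (c : Char) (xs : List Char)
    (hc : PySem.Chars.isspace c = false) :
    PySem.Chars.rstrip (ys ++ c :: xs) = ys ++ c :: PySem.Chars.rstrip xs := by
  unfold PySem.Chars.rstrip
  have hrev : (ys ++ c :: xs).reverse = xs.reverse ++ c :: ys.reverse := by simp
  rw [hrev, List.dropWhile_append]
  by_cases h : (xs.reverse.dropWhile PySem.Chars.isspace).isEmpty
  · simp [h, List.dropWhile_cons, hc, List.isEmpty_iff.mp h]
  · simp [h]

theorem pvStepB_skip (allowed_chars : Option String) (st : List Char × List Char) (c : Char)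
    (h : pvKeep allowed_chars c = false) : pvStepB allowed_chars st c = st := by
  cases allowed_chars with
  | none =>
      unfold pvKeep at h
      simp only [Bool.and_true] at h
      have : (c.toNat < 32 && !(c == '\n')) = true := by
        simp only [Bool.or_eq_false_iff, decide_eq_false_iff_not] at h
        simp [h.1, h.2]; omega
      simp [pvStepB, this]
  | some a =>
      unfold pvKeep at h
      rcases Bool.and_eq_false_iff.mp h with h1 | h2
      · have : (c.toNat < 32 && !(c == '\n')) = true := by
          simp only [Bool.or_eq_false_iff, decide_eq_false_iff_not] at h1
          simp [h1.1, h1.2]; omega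
        simp [pvStepB, this]
      · simp only [Bool.or_eq_false_iff] at h2
        by_cases hc : (c.toNat < 32 && !(c == '\n')) = true
        · simp [pvStepB, hc]
        · simp only [Bool.not_eq_true] at hc
          have hni : c ∉ a.toList := by simpa using h2.2
          simp [pvStepB, hc, h2.1, hni]

theorem pvStepB_keep (allowed_chars : Option String) (st : List Char × List Char) (c : Char)
    (h : pvKeep allowed_chars c = true) :
    pvStepB allowed_chars st c =
      (if PySem.Chars.isspace c then
        (if st.1.isEmpty then st else (st.1, st.2 ++ [c]))
      else (st.1 ++ st.2 ++ [c], [])) := by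
  cases allowed_chars with
  | none =>
      unfold pvKeep at h
      simp only [Bool.and_true] at h
      have hc1 : (c.toNat < 32 && !(c == '\n')) = false := by
        rcases Bool.or_eq_true_iff.mp h with h' | h'
        · have := decide_eq_true_iff.mp h'
          simp; omega
        · simp [h']
      simp [pvStepB, hc1]
  | some a =>
      unfold pvKeep at h
      rcases Bool.and_eq_true_iff.mp h with ⟨h1, h2⟩
      have hc1 : (c.toNat < 32 && !(c == '\n')) = false := by
        rcases Bool.or_eq_true_iff.mp h1 with h' | h'
        · have := decide_eq_true_iff.mp h'
          simp; omega
        · simp [h']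
      rcases Bool.or_eq_true_iff.mp h2 with h' | h'
      · simp [pvStepB, hc1, h']
      · have hm : c ∈ a.toList := by simpa using h'
        simp [pvStepB, hc1, hm]

theorem rstrip_cons_nonspace (c : Char) (xs : List Char)
    (hc : PySem.Chars.isspace c = false) :
    PySem.Chars.rstrip (c :: xs) = c :: PySem.Chars.rstrip xs := by
  have := rstrip_append_cons [] c xs hc
  simpa using this

-- the loop from a NONEMPTY result: pending (all whitespace) plus the rest, right-stripped
theorem loop_ne (allowed_chars : Option String) (l : List Char) :
    ∀ (res pend : List Char), res.isEmpty = false → pend.all PySem.Chars.isspace →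
    (l.foldl (pvStepB allowed_chars) (res, pend)).1 =
      res ++ PySem.Chars.rstrip (pend ++ l.filter (pvKeep allowed_chars)) := by
  induction l with
  | nil =>
      intro res pend _ hp
      simp [rstrip_allspace pend hp]
  | cons c l ih =>
      intro res pend hres hp
      by_cases hk : pvKeep allowed_chars c = true
      · rw [List.foldl_cons, pvStepB_keep _ _ _ hk]
        by_cases hs : PySem.Chars.isspace c = true
        · have hp' : (pend ++ [c]).all PySem.Chars.isspace := by
            simp [List.all_append, hp, hs]
          simp only [hs, if_true, hres, Bool.false_eq_true, if_false]
          rw [ih res (pend ++ [c]) hres hp']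
          simp [List.filter_cons, hk, hs]
        · have hs' : PySem.Chars.isspace c = false := by simp [hs]
          simp only [hs', Bool.false_eq_true, if_false]
          rw [ih (res ++ pend ++ [c]) [] (by simp) (by simp)]
          rw [List.filter_cons_of_pos hk, rstrip_append_cons pend c _ hs']
          simp
      · rw [List.foldl_cons, pvStepB_skip _ _ _ (by simp at hk; exact hk)]
        rw [ih res pend hres hp, List.filter_cons_of_neg (by simp at hk; simp [hk])]
  termination_by l.length

-- the loop from the empty state computes strip of the fused filter
theorem loop_nil (allowed_chars : Option String) (l : List Char) :
    (l.foldl (pvStepB allowed_chars) ([], [])).1 =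
      PySem.Chars.strip (l.filter (pvKeep allowed_chars)) := by
  induction l with
  | nil => simp [PySem.Chars.strip, PySem.Chars.lstrip, PySem.Chars.rstrip]
  | cons c l ih =>
      by_cases hk : pvKeep allowed_chars c = true
      · rw [List.foldl_cons, pvStepB_keep _ _ _ hk]
        by_cases hs : PySem.Chars.isspace c = true
        · simp only [hs, if_true, List.isEmpty_nil, if_true]
          rw [ih, List.filter_cons_of_pos hk]
          simp [PySem.Chars.strip, PySem.Chars.lstrip, List.dropWhile_cons, hs]
        · have hs' : PySem.Chars.isspace c = false := by simp [hs]
          simp only [hs', Bool.false_eq_true, if_false]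
          rw [loop_ne allowed_chars l ([] ++ [] ++ [c]) [] (by simp) (by simp)]
          rw [List.filter_cons_of_pos hk]
          simp [PySem.Chars.strip, PySem.Chars.lstrip, List.dropWhile_cons, hs',
            rstrip_cons_nonspace c _ hs']
      · rw [List.foldl_cons, pvStepB_skip _ _ _ (by simp at hk; exact hk)]
        rw [ih, List.filter_cons_of_neg (by simp at hk; simp [hk])]

-- A's staged filters equal the fused filter
theorem filters_fuse (allowed_chars : Option String) (l : List Char) :
    (match allowed_chars with
     | none => l.filter (fun c => decide (32 ≤ c.toNat) || c == '\n')
     | some a => if a.toList.isEmpty then l.filter (fun c => decide (32 ≤ c.toNat) || c == '\n')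
                 else (l.filter (fun c => decide (32 ≤ c.toNat) || c == '\n')).filter
                        (fun c => a.toList.contains c)) =
    l.filter (pvKeep allowed_chars) := by
  cases allowed_chars with
  | none =>
      apply List.filter_congr
      intro c _
      simp [pvKeep]
  | some a =>
      by_cases h : a.toList.isEmpty
      · simp only [h, if_true]
        apply List.filter_congr
        intro c _
        simp [pvKeep, h]
      · simp only [h, Bool.false_eq_true, if_false, List.filter_filter]
        apply List.filter_congr
        intro c _
        simp only [pvKeep]
        cases hc : a.toList.contains c <;> simp [hc, h]

-- ===== VERDICT (by name: the statement is the Claim_ definition above) =====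
theorem sanitize_input_spec : Claim_equal_sanitize_input := by
  intro text max_length allowed_chars _
  unfold Spec_sanitize_input sanitize_input sanitize_input_alt
  simp only []
  rw [loop_nil, ← filters_fuse allowed_chars]
  cases allowed_chars with
  | none => simp [PySem.Str.strip]
  | some a => by_cases h : a.toList.isEmpty <;> simp [h, PySem.Str.strip]
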